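-- pv_equiv track=rewrite | github.com/TwinAI-inc/GenBI | datasets/chart_suggestions.py | _best_series_cat
-- ===== SOURCE A (Python) =====
-- def _best_series_cat(categoricals):
--     """Best categorical for multi-series (2-6 unique values)."""
--     for c in categoricals:
--         if 2 <= c['cardinality'] <= 6:
--             return c
--     for c in categoricals:
--         if 2 <= c['cardinality'] <= 10:
--             return c
--     return None
-- ===== SOURCE B (Python) =====
-- def _best_series_cat(categoricals):
--     """Best categorical for multi-series (2-6 unique values)."""
--     fallback = None
--     for c in categoricals:
--         card = c['cardinality']
--         if 2 <= card <= 6: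
--             return c
--         if fallback is None and 2 <= card <= 10:
--             fallback = c
--     return fallback
-- ===== Notes on version B (the rewrite author's own statement) =====
-- stated objective: alternative
-- what changed: Replaces A's two sequential scans (tight range [2,6], then broad [2,10]) by a single pass that returns a tight match immediately while remembering the first broad-range element as a fallback.
import Mathlib
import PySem

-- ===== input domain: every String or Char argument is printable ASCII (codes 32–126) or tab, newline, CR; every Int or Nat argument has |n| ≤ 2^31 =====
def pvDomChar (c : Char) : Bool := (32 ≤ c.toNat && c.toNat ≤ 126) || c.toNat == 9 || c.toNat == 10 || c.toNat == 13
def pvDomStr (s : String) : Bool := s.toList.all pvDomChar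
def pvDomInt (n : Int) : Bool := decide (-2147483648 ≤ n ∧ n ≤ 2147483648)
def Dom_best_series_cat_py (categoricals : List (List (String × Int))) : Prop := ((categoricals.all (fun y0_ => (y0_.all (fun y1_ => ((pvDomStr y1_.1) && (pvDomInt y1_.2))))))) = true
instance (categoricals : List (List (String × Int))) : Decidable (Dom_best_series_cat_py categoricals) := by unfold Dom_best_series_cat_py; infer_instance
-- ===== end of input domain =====

-- B collapses A's two sequential scans (tight range [2,6], then broad [2,10]) into one pass
-- that returns a tight match immediately and remembers the first broad-range element as fallback
-- (objective: alternative single-pass decomposition, same asymptotic cost).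


-- ===== PORT A =====
-- c['cardinality'] on the association list: first match, none = KeyError (excluded by Pre_).
def pvCard (c : List (String × Int)) : Option Int := List.lookup "cardinality" c

-- first loop of A: first element with cardinality in [2,6]; none on KeyError (excluded by Pre_)
def pvALoop1 : List (List (String × Int)) → Option (List (String × Int))
  | [] => none
  | c :: rest =>
    match pvCard c with
    | none => none
    | some v => if 2 ≤ v ∧ v ≤ 6 then some c else pvALoop1 rest

-- second loop of A: first element with cardinality in [2,10]
def pvALoop2 : List (List (String × Int)) → Option (List (String × Int))
  | [] => none
  | c :: rest =>
    match pvCard c with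
    | none => none
    | some v => if 2 ≤ v ∧ v ≤ 10 then some c else pvALoop2 rest

def best_series_cat_py (categoricals : List (List (String × Int))) : Option (List (String × Int)) :=
  match pvALoop1 categoricals with
  | some c => some c
  | none => pvALoop2 categoricals

-- ===== PORT B =====
-- single pass carrying the fallback; reads each cardinality exactly once, in order
def pvBLoop : List (List (String × Int)) → Option (List (String × Int)) → Option (List (String × Int))
  | [], fb => fb
  | c :: rest, fb =>
    match pvCard c with
    | none => none
    | some v =>
      if 2 ≤ v ∧ v ≤ 6 then some c
      else pvBLoop rest (if fb = none ∧ 2 ≤ v ∧ v ≤ 10 then some c else fb)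

def best_series_cat_py_alt (categoricals : List (List (String × Int))) : Option (List (String × Int)) :=
  pvBLoop categoricals none

-- ===== PRECONDITION & SPEC =====
def pvTight (c : List (String × Int)) : Bool :=
  match List.lookup "cardinality" c with
  | some v => decide (2 ≤ v ∧ v ≤ 6)
  | none => false

-- Pre_ excludes exactly the inputs on which the Python raises KeyError: a dict without the
-- 'cardinality' key occurring before any dict whose cardinality is in the tight range [2,6].
def Pre_best_series_cat_py (categoricals : List (List (String × Int))) : Prop :=
  ∀ c ∈ categoricals.takeWhile (fun c => !pvTight c), (List.lookup "cardinality" c).isSome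
instance (categoricals : List (List (String × Int))) : Decidable (Pre_best_series_cat_py categoricals) := by unfold Pre_best_series_cat_py; infer_instance

def pvWitness_best_series_cat_py : (List (List (String × Int))) :=
  [[("cardinality", 8)], [("cardinality", 3)], [("other", 1)]]

def Spec_best_series_cat_py (categoricals : List (List (String × Int))) (out : Option (List (String × Int))) : Prop := out = best_series_cat_py_alt categoricals
instance (categoricals : List (List (String × Int))) (out : Option (List (String × Int))) : Decidable (Spec_best_series_cat_py categoricals out) := by unfold Spec_best_series_cat_py; infer_instance

-- ===== CLAIM (what is proved, stated in full; the proofs are below) =====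
def Claim_equal_best_series_cat_py : Prop := ∀ (categoricals : List (List (String × Int))), Dom_best_series_cat_py categoricals → Pre_best_series_cat_py categoricals → Spec_best_series_cat_py categoricals (best_series_cat_py categoricals)

-- ===== LEMMAS AND PROOFS =====

-- the single pass with fallback fb equals: first tight match, else fb, else first broad match
theorem pvBLoop_eq (cats : List (List (String × Int))) (fb : Option (List (String × Int)))
    (h : Pre_best_series_cat_py cats) :
    pvBLoop cats fb =
      match pvALoop1 cats with
      | some c => some c
      | none => match fb with
        | some f => some f
        | none => pvALoop2 cats := by
  induction cats generalizing fb with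
  | nil => cases fb <;> simp [pvBLoop, pvALoop1, pvALoop2]
  | cons c rest ih =>
    cases hv : pvCard c with
    | none =>
      exfalso
      have hvl : List.lookup "cardinality" c = none := hv
      have hc : c ∈ (c :: rest).takeWhile (fun c => !pvTight c) := by
        have ht : pvTight c = false := by simp [pvTight, hvl]
        simp [List.takeWhile, ht]
      have := h c hc
      rw [hvl] at this
      simp at this
    | some v =>
      by_cases htight : 2 ≤ v ∧ v ≤ 6
      · simp [pvBLoop, pvALoop1, hv, htight]
      · have hrest : Pre_best_series_cat_py rest := by
          intro x hx
          apply h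
          have ht : pvTight c = false := by
            have hvl : List.lookup "cardinality" c = some v := hv
            unfold pvTight
            rw [hvl]
            simp only [decide_eq_false_iff_not]
            omega
          simp [List.takeWhile, ht]
          exact Or.inr hx
        simp only [pvBLoop, pvALoop1, pvALoop2, hv, if_neg htight]
        rw [ih _ hrest]
        cases hl1 : pvALoop1 rest with
        | some x => simp
        | none =>
          cases fb with
          | some f => simp
          | none =>
            by_cases hbroad : 2 ≤ v ∧ v ≤ 10
            · simp [hbroad]
            · simp [hbroad]

-- ===== VERDICT (by name: the statement is the Claim_ definition above) =====
theorem best_series_cat_py_spec : Claim_equal_best_series_cat_py := by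
  intro cats _ hpre
  unfold Spec_best_series_cat_py best_series_cat_py best_series_cat_py_alt
  rw [pvBLoop_eq cats none hpre]
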